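-- pv_equiv track=rewrite | github.com/Overton77/humanupgrade-app-ingestion_research | src/research_agent/agent_tools/mongo_file_system_functions.py | _split_mongo_relpath
-- ===== SOURCE A (Python) =====
-- def _split_mongo_relpath(mongo_relpath: str) -> list[str]:
--     """
--     Split a Mongo-stored relative path into components, handling:
--     - Windows backslashes
--     - forward slashes
--     - accidental leading/trailing separators
--     """
--     if not mongo_relpath or not mongo_relpath.strip():
--         raise ValueError("mongo_relpath cannot be empty")
--
--     # Normalize separators to '/'
--     normalized = mongo_relpath.strip().replace("\\", "/")
--
--     # Remove leading "./" and leading/trailing "/"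
--     while normalized.startswith("./"):
--         normalized = normalized[2:]
--     normalized = normalized.strip("/")
--
--     parts = [p for p in normalized.split("/") if p and p != "."]
--     return parts
-- ===== SOURCE B (Python) =====
-- def _split_mongo_relpath(mongo_relpath: str) -> list[str]:
--     """Single-pass scanner: walk the stripped string once, flushing the
--     current token at each separator ('/' or '\\'), skipping empty and '.' tokens."""
--     s = mongo_relpath.strip()
--     if not s:
--         raise ValueError("mongo_relpath cannot be empty")
--     parts = []
--     buf = ""
--     for ch in s:
--         if ch == '/' or ch == '\\':
--             if buf and buf != '.':
--                 parts.append(buf)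
--             buf = ""
--         else:
--             buf += ch
--     if buf and buf != '.':
--         parts.append(buf)
--     return parts
-- ===== Notes on version B (the rewrite author's own statement) =====
-- stated objective: alternative
-- what changed: Replaces A's multi-pass pipeline (backslash replacement, a while-loop stripping dot-slash prefixes, separator strip, split, filter comprehension) by a single character-by-character scan that flushes a token buffer at each separator, skipping empty and single-dot tokens inline.
import Mathlib
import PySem

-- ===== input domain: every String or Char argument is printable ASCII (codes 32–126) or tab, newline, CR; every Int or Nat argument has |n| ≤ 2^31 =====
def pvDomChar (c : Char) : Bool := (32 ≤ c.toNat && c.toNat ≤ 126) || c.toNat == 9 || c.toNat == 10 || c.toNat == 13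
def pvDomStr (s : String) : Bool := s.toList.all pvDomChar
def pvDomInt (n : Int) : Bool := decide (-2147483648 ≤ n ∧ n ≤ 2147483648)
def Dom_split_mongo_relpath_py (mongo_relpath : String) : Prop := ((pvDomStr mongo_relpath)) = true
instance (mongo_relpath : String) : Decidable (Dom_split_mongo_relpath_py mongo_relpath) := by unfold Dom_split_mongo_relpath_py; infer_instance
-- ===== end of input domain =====

-- B replaces A's multi-pass pipeline (replace, while-strip of dot-slash prefixes, separator strip, split, filter)
-- by a single character scan with a token buffer; same return value wherever A returns.

-- ===== PORT A =====
-- the `while normalized.startswith("./"): normalized = normalized[2:]` loop of A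
def pvDropDotSlash (cs : List Char) : List Char :=
  if h : PySem.Chars.startswith cs ['.', '/'] then pvDropDotSlash (cs.drop 2) else cs
termination_by cs.length
decreasing_by
  have hp := (PySem.Chars.startswith_iff cs ['.', '/']).mp h
  have h2 : 2 ≤ cs.length := by simpa using hp.length_le
  simp; omega

-- the `raise ValueError` branch is excluded by Pre_; strings handled as List Char via PySem.Chars
def split_mongo_relpath_py (mongo_relpath : String) : List String :=
  let normalized := PySem.Chars.replace (PySem.Chars.strip mongo_relpath.toList) ['\\'] ['/']
  let normalized2 := pvDropDotSlash normalized
  let normalized3 := PySem.Chars.stripChars normalized2 ['/']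
  ((PySem.Chars.splitOn normalized3 ['/']).filter
      (fun p => !(p == []) && !(p == ['.']))).map String.ofList

-- ===== PORT B =====
-- flush the buffer: append it to parts when it is a kept token
def pvFlush (parts : List (List Char)) (buf : List Char) : List (List Char) :=
  if !(buf == []) && !(buf == ['.']) then parts ++ [buf] else parts

-- the single pass over the characters of the stripped string
def pvScan : List Char → List (List Char) → List Char → List (List Char)
  | [], parts, buf => pvFlush parts buf
  | c :: rest, parts, buf =>
    if c == '/' || c == '\\' then pvScan rest (pvFlush parts buf) []
    else pvScan rest parts (buf ++ [c])

-- the `raise ValueError` branch is excluded by Pre_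
def split_mongo_relpath_py_alt (mongo_relpath : String) : List String :=
  (pvScan (PySem.Chars.strip mongo_relpath.toList) [] []).map String.ofList

-- ===== PRECONDITION & SPEC =====
-- Pre_ excludes exactly the inputs whose strip() is empty, on which both A and B raise ValueError
def Pre_split_mongo_relpath_py (mongo_relpath : String) : Prop :=
  PySem.Chars.strip mongo_relpath.toList ≠ []
instance (mongo_relpath : String) : Decidable (Pre_split_mongo_relpath_py mongo_relpath) := by
  unfold Pre_split_mongo_relpath_py; infer_instance
def pvWitness_split_mongo_relpath_py : String := "a/b"

def Spec_split_mongo_relpath_py (mongo_relpath : String) (out : List String) : Prop := out = split_mongo_relpath_py_alt mongo_relpath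
instance (mongo_relpath : String) (out : List String) : Decidable (Spec_split_mongo_relpath_py mongo_relpath out) := by unfold Spec_split_mongo_relpath_py; infer_instance

-- ===== CLAIM (what is proved, stated in full; the proofs are below) =====
def Claim_equal_split_mongo_relpath_py : Prop := ∀ (mongo_relpath : String), Dom_split_mongo_relpath_py mongo_relpath → Pre_split_mongo_relpath_py mongo_relpath → Spec_split_mongo_relpath_py mongo_relpath (split_mongo_relpath_py mongo_relpath)

-- ===== LEMMAS AND PROOFS =====

-- the substitution replace(s, "\\", "/") performs
def pvSub (c : Char) : Char := if c == '\\' then '/' else c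

theorem pv_replace_go_spec (l : List Char) : ∀ (acc : List Char) (fuel : Nat), l.length ≤ fuel →
    PySem.Chars.replace.go ['\\'] ['/'] fuel l acc = acc.reverse ++ l.map pvSub := by
  induction l with
  | nil => intro acc fuel _; cases fuel <;> simp [PySem.Chars.replace.go]
  | cons c t ih =>
    intro acc fuel hf
    cases fuel with
    | zero => simp at hf
    | succ f =>
      by_cases hc : c = '\\'
      · subst hc
        simp [PySem.Chars.replace.go, List.isPrefixOf, ih _ f (by simpa using hf), pvSub]
      · simp [PySem.Chars.replace.go, List.isPrefixOf, hc, ih _ f (by simpa using hf), pvSub]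
        exact fun h => absurd h.symm hc

theorem pv_replace_eq_map (u : List Char) :
    PySem.Chars.replace u ['\\'] ['/'] = u.map pvSub := by
  simpa [PySem.Chars.replace] using pv_replace_go_spec u [] u.length le_rfl

def pvSplit1 (cur : List Char) : List Char → List (List Char)
  | [] => [cur.reverse]
  | c :: rest => if c == '/' then cur.reverse :: pvSplit1 [] rest else pvSplit1 (c :: cur) rest

theorem pv_splitOn_go_spec (l : List Char) : ∀ (cur : List Char) (acc : List (List Char)) (fuel : Nat),
    l.length ≤ fuel →
    PySem.Chars.splitOn.go ['/'] fuel l cur acc = acc.reverse ++ pvSplit1 cur l := by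
  induction l with
  | nil => intro cur acc fuel _; cases fuel <;> simp [PySem.Chars.splitOn.go, pvSplit1]
  | cons c t ih =>
    intro cur acc fuel hf
    cases fuel with
    | zero => simp at hf
    | succ f =>
      by_cases hc : c = '/'
      · subst hc
        simp [PySem.Chars.splitOn.go, List.isPrefixOf, ih _ _ f (by simpa using hf), pvSplit1]
      · simp [PySem.Chars.splitOn.go, List.isPrefixOf, hc, ih _ _ f (by simpa using hf), pvSplit1]
        exact fun h => absurd h.symm hc

theorem pv_splitOn_eq (u : List Char) :
    PySem.Chars.splitOn u ['/'] = pvSplit1 [] u := by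
  simpa [PySem.Chars.splitOn] using pv_splitOn_go_spec u [] [] (u.length+1) (by omega)

def pvTokens (u : List Char) : List (List Char) :=
  (pvSplit1 [] u).filter (fun p => !(p == []) && !(p == ['.']))

theorem pv_split1_sepfree (u : List Char) : ∀ cur : List Char, '/' ∉ u →
    pvSplit1 cur u = [cur.reverse ++ u] := by
  induction u with
  | nil => intro cur _; simp [pvSplit1]
  | cons c t ih =>
    intro cur h
    have hc : ¬ c = '/' := fun hh => h (by simp [hh])
    simp [pvSplit1, hc, ih (c :: cur) (fun hm => h (List.mem_cons_of_mem _ hm))]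

theorem pv_split1_prefix (buf : List Char) : ∀ (cur rest : List Char), '/' ∉ buf →
    pvSplit1 cur (buf ++ '/' :: rest) = (cur.reverse ++ buf) :: pvSplit1 [] rest := by
  induction buf with
  | nil => intro cur rest _; simp [pvSplit1]
  | cons c t ih =>
    intro cur rest h
    have hc : ¬ c = '/' := fun hh => h (by simp [hh])
    simp [pvSplit1, hc, ih (c :: cur) rest (fun hm => h (List.mem_cons_of_mem _ hm))]

theorem pv_tokens_cons_sep (u : List Char) : pvTokens ('/' :: u) = pvTokens u := by
  simp [pvTokens, pvSplit1]

theorem pv_tokens_dotslash (u : List Char) : pvTokens ('.' :: '/' :: u) = pvTokens u := by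
  simp [pvTokens, pvSplit1]

theorem pv_split1_append_sep (u : List Char) : ∀ cur : List Char,
    pvSplit1 cur (u ++ ['/']) = pvSplit1 cur u ++ [[]] := by
  induction u with
  | nil => intro cur; simp [pvSplit1]
  | cons c t ih =>
    intro cur
    by_cases hc : c = '/' <;> simp [pvSplit1, hc, ih]

theorem pv_tokens_append_sep (u : List Char) : pvTokens (u ++ ['/']) = pvTokens u := by
  simp [pvTokens, pv_split1_append_sep]

theorem pv_tokens_dropWhile (u : List Char) :
    pvTokens (u.dropWhile (fun c => ['/'].contains c)) = pvTokens u := by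
  induction u with
  | nil => rfl
  | cons c t ih =>
    by_cases hc : c = '/'
    · subst hc; simpa [List.dropWhile, pv_tokens_cons_sep] using ih
    · simp [List.dropWhile, hc]

theorem pv_tokens_rdropWhile (u : List Char) :
    pvTokens (u.reverse.dropWhile (fun c => ['/'].contains c)).reverse = pvTokens u := by
  induction u using List.reverseRecOn with
  | nil => rfl
  | append_singleton ys y ih =>
    by_cases hy : y = '/'
    · subst hy
      simpa [List.dropWhile, pv_tokens_append_sep] using ih
    · simp [hy]

theorem pv_tokens_stripChars (u : List Char) :
    pvTokens (PySem.Chars.stripChars u ['/']) = pvTokens u := by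
  rw [PySem.Chars.stripChars]
  rw [pv_tokens_rdropWhile (u.dropWhile (fun c => ['/'].contains c)), pv_tokens_dropWhile]

theorem pv_map_sub_id (buf : List Char) (h : '\\' ∉ buf) : buf.map pvSub = buf := by
  induction buf with
  | nil => rfl
  | cons c t ih =>
    have hc : ¬ c = '\\' := fun hh => h (by simp [hh])
    simp [pvSub, hc, ih (fun hm => h (List.mem_cons_of_mem _ hm))]

theorem pv_tokens_dropDotSlash (u : List Char) :
    pvTokens (pvDropDotSlash u) = pvTokens u := by
  induction u using pvDropDotSlash.induct with
  | case1 cs h ih =>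
    obtain ⟨t, ht⟩ := (PySem.Chars.startswith_iff cs ['.', '/']).mp h
    subst ht
    rw [pvDropDotSlash, dif_pos h]
    simpa [pv_tokens_dotslash] using ih
  | case2 cs h => rw [pvDropDotSlash, dif_neg h]

theorem pv_scan_invariant (u : List Char) : ∀ (parts : List (List Char)) (buf : List Char),
    '/' ∉ buf → '\\' ∉ buf →
    pvScan u parts buf = parts ++ pvTokens ((buf ++ u).map pvSub) := by
  induction u with
  | nil =>
    intro parts buf h1 h2
    simp only [pvScan, List.append_nil, pv_map_sub_id buf h2]
    rw [pvTokens, pv_split1_sepfree buf [] h1, pvFlush]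
    simp only [List.filter_cons, List.filter_nil, List.reverse_nil, List.nil_append]
    cases hP : (!(buf == []) && !(buf == ['.'])) <;> simp
  | cons c t ih =>
    intro parts buf h1 h2
    by_cases hc : c = '/' ∨ c = '\\'
    · have hsep : (c == '/' || c == '\\') = true := by
        rcases hc with h | h <;> simp [h]
      rw [pvScan]
      simp only [hsep, if_true]
      rw [ih (pvFlush parts buf) [] (by simp) (by simp)]
      have hsub : pvSub c = '/' := by rcases hc with h | h <;> simp [pvSub, h]
      have hmap : (buf ++ c :: t).map pvSub = buf ++ '/' :: t.map pvSub := by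
        simp [pv_map_sub_id buf h2, hsub]
      simp only [List.nil_append]
      rw [hmap]
      simp only [pvTokens, pv_split1_prefix buf [] (t.map pvSub) h1, pvFlush]
      simp only [List.filter_cons, List.reverse_nil, List.nil_append]
      cases hP : (!(buf == []) && !(buf == ['.'])) <;> simp
    · rw [not_or] at hc
      have hsep : (c == '/' || c == '\\') = false := by simp [hc.1, hc.2]
      rw [pvScan]
      simp only [hsep, Bool.false_eq_true, if_false]
      rw [ih parts (buf ++ [c]) (by simp [h1, Ne.symm hc.1]) (by simp [h2, Ne.symm hc.2])]
      simp

theorem pv_ports_agree (s : String) :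
    split_mongo_relpath_py s = split_mongo_relpath_py_alt s := by
  simp only [split_mongo_relpath_py, split_mongo_relpath_py_alt]
  rw [pv_scan_invariant _ [] [] (by simp) (by simp)]
  rw [pv_replace_eq_map, pv_splitOn_eq]
  have hA : ∀ x : List Char,
      (pvSplit1 [] x).filter (fun p => !(p == []) && !(p == ['.'])) = pvTokens x := fun _ => rfl
  rw [hA, pv_tokens_stripChars, pv_tokens_dropDotSlash]
  simp

-- ===== VERDICT (by name: the statement is the Claim_ definition above) =====
theorem split_mongo_relpath_py_spec : Claim_equal_split_mongo_relpath_py := by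
  intro s _ _
  exact pv_ports_agree s
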